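-- pv_equiv track=rewrite | github.com/kishhcodes/cloudsec-agent | src/audit/exporters/csv_exporter.py | _get_all_fieldnames
-- ===== SOURCE A (Python) =====
-- from typing import Dict, Any, List, Optional
--
-- def _get_all_fieldnames(findings: List[Dict[str, Any]]) -> List[str]:
--     """Extract all unique fieldnames from findings."""
--     fieldnames = set()
--     for finding in findings:
--         fieldnames.update(finding.keys())
--
--     # Prioritize important fields at the beginning
--     priority_fields = ['id', 'title', 'severity', 'category', 'resource',
--                       'description', 'remediation', 'status']
--     ordered_fields = [f for f in priority_fields if f in fieldnames]
--     remaining_fields = sorted([f for f in fieldnames if f not in priority_fields])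
--
--     return ordered_fields + remaining_fields
-- ===== SOURCE B (Python) =====
-- from typing import Dict, Any, List, Optional
--
-- def _get_all_fieldnames(findings: List[Dict[str, Any]]) -> List[str]:
--     """Extract all unique fieldnames from findings, priority fields first."""
--     priority_fields = ['id', 'title', 'severity', 'category', 'resource',
--                        'description', 'remediation', 'status']
--     rank = {f: i for i, f in enumerate(priority_fields)}
--     fieldnames = set()
--     for finding in findings:
--         fieldnames.update(finding.keys())
--     sentinel = len(priority_fields)
--     return sorted(fieldnames, key=lambda f: (rank.get(f, sentinel), f))
-- ===== Notes on version B (the rewrite author's own statement) =====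
-- stated objective: simpler
-- what changed: Replaces A's two list comprehensions over the priority list and the set plus a separate sort and concatenation by one sorted() call over the key set with a (rank, name) tuple key, where rank is a precomputed index dict defaulting to a sentinel for non-priority fields.
import Mathlib
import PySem

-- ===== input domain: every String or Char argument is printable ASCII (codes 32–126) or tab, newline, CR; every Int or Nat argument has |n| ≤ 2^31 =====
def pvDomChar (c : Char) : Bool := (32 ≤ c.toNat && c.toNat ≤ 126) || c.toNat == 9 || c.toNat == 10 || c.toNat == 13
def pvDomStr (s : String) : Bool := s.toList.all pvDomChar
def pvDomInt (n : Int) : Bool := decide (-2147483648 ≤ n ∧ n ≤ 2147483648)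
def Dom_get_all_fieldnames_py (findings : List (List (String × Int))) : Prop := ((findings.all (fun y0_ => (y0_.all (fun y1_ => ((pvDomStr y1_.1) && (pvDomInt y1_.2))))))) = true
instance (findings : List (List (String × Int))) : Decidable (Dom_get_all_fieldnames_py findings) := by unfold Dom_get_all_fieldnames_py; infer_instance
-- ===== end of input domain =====

-- B replaces A's two comprehensions + separate sort + concatenation by a single
-- sorted() call with a (rank, name) tuple key (rank from a precomputed index dict).

-- ===== PORT A =====
-- the priority_fields literal (same in both Pythons)
def pvPriorityFields : List String :=
  ["id", "title", "severity", "category", "resource",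
   "description", "remediation", "status"]

-- the 'fieldnames' set built by the loop 'for finding in findings: fieldnames.update(finding.keys())'
-- (identical loop in both Pythons)
def pvFieldSet (findings : List (List (String × Int))) : PySem.Set String :=
  findings.foldl (fun s finding => PySem.Set.update s (finding.map Prod.fst)) PySem.Set.empty

def get_all_fieldnames_py (findings : List (List (String × Int))) : List String :=
  let fieldnames := pvFieldSet findings
  let ordered_fields := pvPriorityFields.filter (fun f => PySem.Set.contains fieldnames f)
  let remaining_fields := PySem.List.sorted
      (fieldnames.filter (fun f => !(List.contains pvPriorityFields f))) (fun x => x)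
  ordered_fields ++ remaining_fields

-- ===== PORT B =====
-- rank = {f: i for i, f in enumerate(priority_fields)}
def pvRank : PySem.Dict String Int :=
  (PySem.List.enumerate pvPriorityFields).foldl (fun d p => PySem.Dict.insert d p.2 p.1) PySem.Dict.empty

def get_all_fieldnames_py_alt (findings : List (List (String × Int))) : List String :=
  let fieldnames := pvFieldSet findings
  let sentinel : Int := (pvPriorityFields.length : Int)
  PySem.List.sorted2 fieldnames (fun f => PySem.Dict.getD pvRank f sentinel) (fun f => f)

-- ===== PRECONDITION & SPEC =====
def Spec_get_all_fieldnames_py (findings : List (List (String × Int))) (out : List String) : Prop := out = get_all_fieldnames_py_alt findings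
instance (findings : List (List (String × Int))) (out : List String) : Decidable (Spec_get_all_fieldnames_py findings out) := by unfold Spec_get_all_fieldnames_py; infer_instance

-- ===== CLAIM (what is proved, stated in full; the proofs are below) =====
def Claim_equal_get_all_fieldnames_py : Prop := ∀ (findings : List (List (String × Int))), Dom_get_all_fieldnames_py findings → Spec_get_all_fieldnames_py findings (get_all_fieldnames_py findings)

-- ===== LEMMAS AND PROOFS =====

-- sorted2 with keys into linear orders is sorted with the lexicographic (Lex) combined key
theorem sorted2_eq_sorted_lex {α : Type} (xs : List α) (k1 : α → Int) (k2 : α → String) :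
    PySem.List.sorted2 xs k1 k2 =
      PySem.List.sorted xs (fun x => toLex (k1 x, k2 x)) := by
  rw [PySem.List.sorted_eq_foldl_insertBy]
  show List.foldl (fun acc x => PySem.List.insertBy
        (fun a b => decide (k1 a < k1 b) || (!decide (k1 b < k1 a) && decide (k2 a < k2 b))) x acc) [] xs = _
  congr 1
  funext acc x
  congr 1
  funext a b
  rcases lt_trichotomy (k1 a) (k1 b) with h | h | h
  · simp [Prod.Lex.lt_iff, h, not_lt_of_gt h]
  · simp [Prod.Lex.lt_iff, h]
  · simp [Prod.Lex.lt_iff, h, not_lt_of_gt h, ne_of_gt h]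

theorem nodup_set_update {α : Type} [BEq α] [LawfulBEq α] (s : PySem.Set α) (xs : List α)
    (h : s.Nodup) : (PySem.Set.update s xs).Nodup := by
  induction xs generalizing s with
  | nil => exact h
  | cons x xs ih => exact ih _ (PySem.Set.nodup_add s x h)

theorem nodup_fieldSet_aux (l : List (List (String × Int))) (s : PySem.Set String)
    (h : s.Nodup) :
    (l.foldl (fun s finding => PySem.Set.update s (finding.map Prod.fst)) s).Nodup := by
  induction l generalizing s with
  | nil => exact h
  | cons f l ih => exact ih _ (nodup_set_update s _ h)

theorem nodup_fieldSet (findings : List (List (String × Int))) :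
    (pvFieldSet findings).Nodup :=
  nodup_fieldSet_aux findings PySem.Set.empty List.nodup_nil

-- the rank lookup of every priority field is its index, in particular < 8
theorem rank_mem_lt : ∀ f ∈ pvPriorityFields, PySem.Dict.getD pvRank f 8 < 8 := by decide

-- ranks strictly increase along priority_fields
theorem rank_pairwise :
    pvPriorityFields.Pairwise
      (fun a b => PySem.Dict.getD pvRank a 8 < PySem.Dict.getD pvRank b 8) := by decide

theorem nodup_priority : pvPriorityFields.Nodup := by decide

-- a name outside priority_fields gets the sentinel rank 8
theorem rank_notmem (f : String) (hf : f ∉ pvPriorityFields) :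
    PySem.Dict.getD pvRank f 8 = 8 := by
  have hfind : List.find? (fun p => p.1 == f) (PySem.Dict.items pvRank) = none := by
    rw [List.find?_eq_none]
    intro x hx
    have hx1 : x.1 ∈ pvPriorityFields := by
      revert hx; show x ∈ PySem.Dict.items pvRank → _
      have : PySem.Dict.items pvRank =
          [("id", (0:Int)), ("title", 1), ("severity", 2), ("category", 3), ("resource", 4),
           ("description", 5), ("remediation", 6), ("status", 7)] := by rfl
      rw [this]
      intro hx
      simp only [List.mem_cons, List.not_mem_nil, or_false] at hx
      rcases hx with h|h|h|h|h|h|h|h <;> (rw [h]; simp [pvPriorityFields])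
    simp only [beq_iff_eq]
    intro he
    exact hf (he ▸ hx1)
  simp [PySem.Dict.getD, PySem.Dict.get?, hfind]

-- ===== VERDICT (by name: the statement is the Claim_ definition above) =====
theorem get_all_fieldnames_py_spec : Claim_equal_get_all_fieldnames_py := by
  intro findings _
  unfold Spec_get_all_fieldnames_py get_all_fieldnames_py get_all_fieldnames_py_alt
  set S := pvFieldSet findings with hSdef
  have hS : S.Nodup := nodup_fieldSet findings
  have hsent : (pvPriorityFields.length : Int) = 8 := by rfl
  rw [hsent, sorted2_eq_sorted_lex]
  -- notation
  set k1 : String → Int := fun f => PySem.Dict.getD pvRank f 8 with hk1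
  set ordered := pvPriorityFields.filter (fun f => PySem.Set.contains S f) with hord
  set R := S.filter (fun f => !(List.contains pvPriorityFields f)) with hR
  set sortedR := PySem.List.sorted R (fun x => x) with hsR
  -- membership facts
  have hmem_ord : ∀ {a}, a ∈ ordered → a ∈ pvPriorityFields ∧ a ∈ S := by
    intro a ha
    rw [hord, List.mem_filter] at ha
    exact ⟨ha.1, by simpa [PySem.Set.contains, List.contains_iff_mem] using ha.2⟩
  have hmem_sR : ∀ {b}, b ∈ sortedR → b ∈ S ∧ b ∉ pvPriorityFields := by
    intro b hb
    rw [hsR, PySem.List.mem_sorted, hR, List.mem_filter] at hb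
    exact ⟨hb.1, by simpa [List.contains_iff_mem] using hb.2⟩
  -- the combined key is strictly increasing along A's output
  have hpw : (ordered ++ sortedR).Pairwise
      (fun a b => (fun x => toLex (k1 x, x)) a < (fun x => toLex (k1 x, x)) b) := by
    rw [List.pairwise_append]
    refine ⟨?_, ?_, ?_⟩
    · refine List.Pairwise.sublist List.filter_sublist ?_
      refine rank_pairwise.imp (fun h => ?_)
      rw [Prod.Lex.lt_iff]; simp only [ofLex_toLex]; exact Or.inl h
    · have hnd : sortedR.Nodup := ((PySem.List.sorted_perm R _ false).nodup_iff).mpr (hS.filter _)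
      have hle : sortedR.Pairwise (fun a b => a ≤ b) := PySem.List.sorted_pairwise R (fun x => x)
      have hlt : sortedR.Pairwise (fun a b => a < b) :=
        (hle.and hnd).imp (fun h => lt_of_le_of_ne h.1 h.2)
      refine hlt.imp_of_mem (fun {a b} ha hb hab => ?_)
      have h8a := rank_notmem a (hmem_sR ha).2
      have h8b := rank_notmem b (hmem_sR hb).2
      rw [Prod.Lex.lt_iff]; simp only [ofLex_toLex]
      exact Or.inr ⟨by show pvRank.getD a 8 = pvRank.getD b 8; rw [h8a, h8b], hab⟩
    · intro a ha b hb
      have h1 : k1 a < 8 := rank_mem_lt a (hmem_ord ha).1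
      have h2 : k1 b = 8 := rank_notmem b (hmem_sR hb).2
      rw [Prod.Lex.lt_iff]; simp only [ofLex_toLex]
      exact Or.inl (by rw [h2]; exact h1)
  -- A's output is a permutation of the key set
  have hperm : (ordered ++ sortedR).Perm S := by
    have h1 : sortedR.Perm R := PySem.List.sorted_perm R _ false
    have h2 : ordered.Perm (S.filter (fun f => List.contains pvPriorityFields f)) := by
      rw [List.perm_ext_iff_of_nodup (nodup_priority.filter _) (hS.filter _)]
      intro a
      simp only [List.mem_filter, PySem.Set.contains, List.contains_iff_mem]
      exact and_comm
    exact (h2.append h1).trans (List.filter_append_perm _ S)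
  exact (PySem.List.sorted_eq_of_perm_of_pairwise_lt S (ordered ++ sortedR) _ hperm hpw).symm
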